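-- pv_equiv track=rewrite | github.com/Brandon-Parker9/Text-Retrieval | A2/functions.py | generate_query_vector
-- ===== SOURCE A (Python) =====
-- def generate_query_vector(query_terms, positional_index):
--
--     # Initialize the query vector
--     query_vector = []
--
--     # Get the keys of the positional index
--     word_key_list = list(positional_index.keys())
--
--     # Initialize the query vector with zeros
--     for _ in range(len(positional_index)):
--         query_vector.append(0)
--
--     # Iterate through each term in the query terms
--     for term in query_terms:
--
--         # Check if the term is in the positional index
--         if term in positional_index:
--
--             # Get the index of the term in the word key list
--             index = word_key_list.index(term)
--
--             # Set the corresponding element in the query vector to 1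
--             query_vector[index] = 1
--
--     return query_vector
-- ===== SOURCE B (Python) =====
-- def generate_query_vector(query_terms, positional_index):
--     qset = set(query_terms)
--     return [1 if key in qset else 0 for key in positional_index]
-- ===== Notes on version B (the rewrite author's own statement) =====
-- stated objective: simpler
-- what changed: B drives a single comprehension over the vocabulary keys testing membership in a set built once from the query, instead of allocating a zero vector and back-patching positions found via a repeated list.index scan from the query side.
import Mathlib
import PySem

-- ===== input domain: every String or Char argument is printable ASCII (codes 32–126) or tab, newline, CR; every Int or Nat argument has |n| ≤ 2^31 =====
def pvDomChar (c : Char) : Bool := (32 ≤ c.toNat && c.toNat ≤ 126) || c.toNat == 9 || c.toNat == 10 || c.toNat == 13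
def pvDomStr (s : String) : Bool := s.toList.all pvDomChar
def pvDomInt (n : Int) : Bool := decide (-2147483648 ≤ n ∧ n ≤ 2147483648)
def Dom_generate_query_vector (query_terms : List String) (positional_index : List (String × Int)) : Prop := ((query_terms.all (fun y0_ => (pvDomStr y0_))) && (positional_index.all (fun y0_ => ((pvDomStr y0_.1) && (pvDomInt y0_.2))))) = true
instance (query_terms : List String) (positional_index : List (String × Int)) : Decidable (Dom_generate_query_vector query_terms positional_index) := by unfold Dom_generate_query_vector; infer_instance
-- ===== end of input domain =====

-- B builds the binary vector by one map over the vocabulary keys testing query-set membership,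
-- instead of A's zero vector back-patched at positions found via list.index from the query side (simpler).


-- ===== PORT A =====
def generate_query_vector (query_terms : List String) (positional_index : List (String × Int)) : List Int :=
  -- query_vector = []
  let query_vector : List Int := []
  -- word_key_list = list(positional_index.keys())
  let word_key_list : List String := positional_index.map (·.1)
  -- for _ in range(len(positional_index)): query_vector.append(0)
  let query_vector : List Int :=
    (PySem.List.pyRange 0 positional_index.length 1).foldl (fun qv _ => qv ++ [0]) query_vector
  -- for term in query_terms: if term in positional_index: index = word_key_list.index(term); query_vector[index] = 1
  query_terms.foldl (fun qv term =>
    if word_key_list.contains term then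
      match PySem.List.index? word_key_list term with
      | some index => qv.set index 1
      | none => qv
    else qv) query_vector

-- ===== PORT B =====
def generate_query_vector_alt (query_terms : List String) (positional_index : List (String × Int)) : List Int :=
  -- qset = set(query_terms)
  let qset : PySem.Set String := PySem.Set.ofList query_terms
  -- [1 if key in qset else 0 for key in positional_index]
  positional_index.map (fun kv => if PySem.Set.contains qset kv.1 then 1 else 0)

-- ===== PRECONDITION & SPEC =====
-- Pre_ excludes association lists with duplicate keys, which correspond to no Python dict
-- (the Python argument is a dict, whose keys are unique); it admits every real input.
def Pre_generate_query_vector (query_terms : List String) (positional_index : List (String × Int)) : Prop :=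
  (positional_index.map Prod.fst).Nodup
instance (query_terms : List String) (positional_index : List (String × Int)) : Decidable (Pre_generate_query_vector query_terms positional_index) := by unfold Pre_generate_query_vector; infer_instance
def pvWitness_generate_query_vector : List String × (List (String × Int)) :=
  (["cat", "dog"], [("ant", 3), ("cat", 1), ("emu", 2)])

def Spec_generate_query_vector (query_terms : List String) (positional_index : List (String × Int)) (out : List Int) : Prop := out = generate_query_vector_alt query_terms positional_index
instance (query_terms : List String) (positional_index : List (String × Int)) (out : List Int) : Decidable (Spec_generate_query_vector query_terms positional_index out) := by unfold Spec_generate_query_vector; infer_instance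

-- ===== CLAIM (what is proved, stated in full; the proofs are below) =====
def Claim_equal_generate_query_vector : Prop := ∀ (query_terms : List String) (positional_index : List (String × Int)), Dom_generate_query_vector query_terms positional_index → Pre_generate_query_vector query_terms positional_index → Spec_generate_query_vector query_terms positional_index (generate_query_vector query_terms positional_index)

-- ===== LEMMAS AND PROOFS =====

-- The zero-initialisation loop produces a replicate.
theorem pv_zero_fold {α : Type} (l : List α) (acc : List Int) :
    l.foldl (fun qv _ => qv ++ [(0 : Int)]) acc = acc ++ List.replicate l.length 0 := by
  induction l generalizing acc with
  | nil => simp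
  | cons x xs ih =>
      simp [List.foldl_cons, ih, List.replicate_succ]

-- Invariant of A's main loop: with nodup keys and a vector of matching length, folding the
-- back-patching step over the terms rewrites exactly the positions whose key is in the terms.
theorem pv_loop_char (keys : List String) (hnd : keys.Nodup) :
    ∀ (terms : List String) (qv : List Int), qv.length = keys.length →
      terms.foldl (fun qv term =>
        if keys.contains term then
          match PySem.List.index? keys term with
          | some index => qv.set index 1
          | none => qv
        else qv) qv
      = (keys.zip qv).map (fun p => if p.1 ∈ terms then 1 else p.2) := by
  intro terms
  induction terms with
  | nil =>
      intro qv hlen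
      simp only [List.foldl_nil]
      apply List.ext_getElem
      · simp [hlen]
      · intro i h1 h2
        simp
  | cons t ts ih =>
      intro qv hlen
      rw [List.foldl_cons]
      by_cases ht : t ∈ keys
      · have hc : keys.contains t = true := by simpa using ht
        obtain ⟨k, hk⟩ : ∃ k, PySem.List.index? keys t = some k := by
          have := (PySem.List.index?_isSome_iff (xs := keys) (v := t)).2 ht
          exact Option.isSome_iff_exists.mp this
        obtain ⟨hklt, hkt, hfirst⟩ := PySem.List.getElem_of_index?_eq_some hk
        simp only [hc, if_pos, hk]
        rw [ih (qv.set k 1) (by simp [hlen])]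
        apply List.ext_getElem
        · simp [hlen]
        · intro i h1 h2
          have hi : i < keys.length := by simpa [hlen] using h1
          have hiq : i < qv.length := by simpa [hlen] using hi
          simp only [List.getElem_map, List.getElem_zip, List.getElem_set]
          have hkey : keys[i] = t ↔ i = k := by
            constructor
            · intro he
              by_contra hne
              exact absurd (hnd.getElem_inj_iff.mp (he.trans hkt.symm)) hne
            · intro he; subst he; exact hkt
          by_cases hmem : keys[i] ∈ ts
          · simp [hmem]
          · by_cases hik : i = k
            · subst hik
              simp [hkt]
            · have hne : keys[i] ≠ t := fun h => hik (hkey.mp h)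
              have hki : k ≠ i := fun h => hik h.symm
              simp [hmem, hne, hki]
      · have hc : keys.contains t = false := by simpa using ht
        simp only [hc, Bool.false_eq_true, if_false]
        rw [ih qv hlen]
        apply List.map_congr_left
        intro p hp
        have hpk : p.1 ∈ keys := List.of_mem_zip hp |>.1
        have : p.1 ≠ t := fun h => ht (h ▸ hpk)
        simp [this]

-- ===== VERDICT (by name: the statement is the Claim_ definition above) =====
theorem generate_query_vector_spec : Claim_equal_generate_query_vector := by
  intro query_terms positional_index _ hpre
  unfold Spec_generate_query_vector generate_query_vector generate_query_vector_alt
  have hlen0 : ((PySem.List.pyRange 0 positional_index.length 1).foldl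
      (fun qv _ => qv ++ [(0 : Int)]) []).length = positional_index.length := by
    rw [pv_zero_fold]
    simp [PySem.List.length_pyRange_one]
  rw [pv_loop_char (positional_index.map (·.1)) (by simpa using hpre) query_terms _
      (by simpa using hlen0)]
  rw [pv_zero_fold]
  simp only [List.nil_append]
  apply List.ext_getElem
  · simp [PySem.List.length_pyRange_one]
  · intro i h1 h2
    have hi : i < positional_index.length := by simpa using h2
    have hrep : i < (List.replicate (PySem.List.pyRange 0 (positional_index.length) 1).length (0:Int)).length := by
      simp [PySem.List.length_pyRange_one]; exact hi
    simp only [List.getElem_map, List.getElem_zip, List.getElem_replicate]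
    by_cases hm : positional_index[i].1 ∈ query_terms
    · simp [hm, PySem.Set.mem_ofList]
    · simp [hm, PySem.Set.mem_ofList]
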